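-- pv_equiv track=rewrite | github.com/sshuzl/luehack25 | multi_mod_2/writeup/multi_mod_decrypt.py | multi_mod_encrypt
-- ===== SOURCE A (Python) =====
-- def multi_mod_encrypt(mods, length):
--     ct = ""
--     for x in range(length):
--         result = x
--         for m in mods:
--             result = result % m
--         ct += str(result)
--     return ct
-- ===== SOURCE B (Python) =====
-- def multi_mod_encrypt(mods, length):
--     if not mods:
--         return "".join(map(str, range(length)))
--     p = abs(mods[0])
--     t = min(p, length)
--     table = []
--     for r in range(t):
--         v = r
--         for m in mods:
--             v = v % m
--         table.append(str(v))
--     return "".join(table[x % p] for x in range(length))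
-- ===== Notes on version B (the rewrite author's own statement) =====
-- stated objective: alternative
-- what changed: B exploits that the digit emitted for x depends only on x % abs(mods[0]): it precomputes a residue table of size min(abs(mods[0]), length) once and then emits table[x % p] per position, instead of redoing the whole chain of modular reductions for every x; this trades the per-position inner loop for a table lookup (a large win only when abs(mods[0]) is small relative to length, which the timing inputs did not exercise).
import Mathlib
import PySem

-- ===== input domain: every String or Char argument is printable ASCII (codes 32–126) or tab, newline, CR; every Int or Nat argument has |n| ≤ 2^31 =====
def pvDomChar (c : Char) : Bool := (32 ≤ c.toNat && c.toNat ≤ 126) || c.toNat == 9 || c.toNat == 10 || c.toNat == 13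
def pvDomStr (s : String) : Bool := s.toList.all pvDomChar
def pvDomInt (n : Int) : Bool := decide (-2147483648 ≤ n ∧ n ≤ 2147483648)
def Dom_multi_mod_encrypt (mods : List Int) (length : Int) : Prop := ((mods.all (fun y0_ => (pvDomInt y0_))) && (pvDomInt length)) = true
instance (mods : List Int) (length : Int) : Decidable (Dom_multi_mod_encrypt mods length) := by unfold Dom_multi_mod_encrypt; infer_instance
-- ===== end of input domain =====

-- B replaces A's per-position chain of modular reductions by a residue table indexed by
-- x % abs(mods[0]) (the emitted digit depends only on that residue); objective: alternative.


-- ===== PORT A =====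
def multi_mod_encrypt (mods : List Int) (length : Int) : String :=
  (PySem.List.pyRange 0 length 1).foldl
    (fun ct x =>
      ct ++ PySem.Int.toStr (mods.foldl (fun result m => PySem.Int.mod result m) x)) ""

-- ===== PORT B =====
-- transliteration of Source B; table[x % p] is ported with pyGetD (default "") — under
-- Pre_ the index x % p is proved to be in range, so it equals Python's plain indexing
def multi_mod_encrypt_alt (mods : List Int) (length : Int) : String :=
  match mods with
  | [] => PySem.Str.join "" ((PySem.List.pyRange 0 length 1).map (fun x => PySem.Int.toStr x))
  | m0 :: _ =>
    let p : Int := |m0|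
    let t : Int := min p length
    let table : List String :=
      (PySem.List.pyRange 0 t 1).foldl
        (fun acc r => acc ++ [PySem.Int.toStr (mods.foldl (fun v m => PySem.Int.mod v m) r)]) []
    PySem.Str.join "" ((PySem.List.pyRange 0 length 1).map
      (fun x => PySem.List.pyGetD table (PySem.Int.mod x p) ""))

-- ===== PRECONDITION & SPEC =====
-- Pre_ excludes exactly the inputs where Python A raises ZeroDivisionError:
-- a positive length together with a 0 in mods (B raises there as well).
def Pre_multi_mod_encrypt (mods : List Int) (length : Int) : Prop :=
  0 < length → (0 : Int) ∉ mods
instance (mods : List Int) (length : Int) : Decidable (Pre_multi_mod_encrypt mods length) := by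
  unfold Pre_multi_mod_encrypt; infer_instance

def pvWitness_multi_mod_encrypt : List Int × Int := ([7, 3], 10)

def Spec_multi_mod_encrypt (mods : List Int) (length : Int) (out : String) : Prop := out = multi_mod_encrypt_alt mods length
instance (mods : List Int) (length : Int) (out : String) : Decidable (Spec_multi_mod_encrypt mods length out) := by unfold Spec_multi_mod_encrypt; infer_instance

-- ===== CLAIM (what is proved, stated in full; the proofs are below) =====
def Claim_equal_multi_mod_encrypt : Prop := ∀ (mods : List Int) (length : Int), Dom_multi_mod_encrypt mods length → Pre_multi_mod_encrypt mods length → Spec_multi_mod_encrypt mods length (multi_mod_encrypt mods length)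

-- ===== LEMMAS AND PROOFS =====

-- ''.join with empty separator is flatten (on the Chars side)
theorem pv_join_nil_flatten (l : List (List Char)) :
    PySem.Chars.join [] l = l.flatten := by
  simp only [PySem.Chars.join, List.intercalate]
  induction l with
  | nil => simp
  | cons c t ih => cases t <;> simp_all [List.intersperse]

theorem pv_join_toList (l : List String) :
    (PySem.Str.join "" l).toList = (l.map String.toList).flatten := by
  simp [PySem.Str.join, pv_join_nil_flatten]

-- A's string accumulation loop, read on the List Char side
theorem pv_foldl_toList (f : Int → String) (xs : List Int) (s : String) :
    (xs.foldl (fun acc x => acc ++ f x) s).toList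
      = s.toList ++ (xs.map (fun x => (f x).toList)).flatten := by
  induction xs generalizing s with
  | nil => simp
  | cons x t ih => simp [ih]

-- Python % is invariant under shifting by a multiple of the divisor
theorem pv_mod_shift (x k b : Int) :
    PySem.Int.mod (x + k * b) b = PySem.Int.mod x b := by
  simp [PySem.Int.mod]

-- x % |m0|  and  x  agree modulo m0 (for Python's %)
theorem pv_mod_abs (x m0 : Int) :
    PySem.Int.mod (x % |m0|) m0 = PySem.Int.mod x m0 := by
  have hdef : x % |m0| = x - |m0| * (x / |m0|) := Int.emod_def x |m0|
  rcases abs_cases m0 with ⟨h, _⟩ | ⟨h, _⟩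
  · have : x % |m0| = x + (-(x / |m0|)) * m0 := by rw [hdef, h]; ring
    rw [this, pv_mod_shift]
  · have : x % |m0| = x + (x / |m0|) * m0 := by rw [hdef, h]; ring
    rw [this, pv_mod_shift]

-- residue bounds: 0 ≤ x % p, x % p < p, and x % p ≤ x for 0 ≤ x
theorem pv_emod_le_self (x p : Int) (hx : 0 ≤ x) (hp : 0 < p) : x % p ≤ x := by
  by_cases h : x < p
  · rw [Int.emod_eq_of_lt hx h]
  · exact le_trans (le_of_lt (Int.emod_lt_of_pos x hp)) (le_of_not_gt h)

theorem multi_mod_encrypt_spec : Claim_equal_multi_mod_encrypt := by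
  intro mods length _hdom hpre
  show multi_mod_encrypt mods length = multi_mod_encrypt_alt mods length
  refine String.toList_inj.mp ?_
  cases mods with
  | nil =>
    simp only [multi_mod_encrypt, multi_mod_encrypt_alt]
    rw [pv_foldl_toList, pv_join_toList, List.map_map]
    simp [Function.comp_def]
  | cons m0 rest =>
    by_cases hl : length ≤ 0
    · have hnil : PySem.List.pyRange 0 length 1 = [] := PySem.List.pyRange_one_eq_nil hl
      simp only [multi_mod_encrypt, multi_mod_encrypt_alt, hnil]
      rw [pv_foldl_toList, pv_join_toList]
      simp
    · have hlen : 0 < length := lt_of_not_ge hl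
      have hm0 : m0 ≠ 0 := by
        intro h; exact hpre hlen (by simp [h])
      have hp : (0 : Int) < |m0| := abs_pos.mpr hm0
      simp only [multi_mod_encrypt, multi_mod_encrypt_alt]
      rw [pv_foldl_toList, pv_join_toList, List.map_map]
      rw [PySem.List.foldl_append_singleton_eq_map, List.nil_append]
      simp only [Function.comp_def]
      rw [show ("" : String).toList = [] from rfl, List.nil_append]
      congr 1
      apply List.map_congr_left
      intro x hx
      have hxb := (PySem.List.mem_pyRange_one).mp hx
      have hx0 : 0 ≤ x := hxb.1
      have hxl : x < length := hxb.2
      have hmod : PySem.Int.mod x |m0| = x % |m0| :=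
        PySem.Int.mod_eq_emod_of_pos hp
      have hr0 : 0 ≤ x % |m0| := Int.emod_nonneg x (ne_of_gt hp)
      have hrp : x % |m0| < |m0| := Int.emod_lt_of_pos x hp
      have hrt : x % |m0| < min |m0| length :=
        lt_min hrp (lt_of_le_of_lt (pv_emod_le_self x |m0| hx0 hp) hxl)
      rw [hmod, PySem.List.pyGetD_map_pyRange_of_nonneg _ _ _ _ hr0 hrt]
      have hstep : PySem.Int.mod (x % |m0|) m0 = PySem.Int.mod x m0 := pv_mod_abs x m0
      simp only [List.foldl_cons, hstep]

-- ===== VERDICT (by name: the statement is the Claim_ definition above) =====
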